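-- pv_equiv track=rewrite | github.com/AK21ER/id_data_extractor | main.py | transliterate_to_amharic
-- ===== SOURCE A (Python) =====
-- def transliterate_to_amharic(en_name):
--     """Basic fallback transliteration for names if Amharic crop fails."""
--     if not en_name or en_name == "—": return "—"
--     # Mapping for common sounds/names (very simplified)
--     mapping = {
--         'a': 'አ', 'b': 'በ', 'c': 'ከ', 'd': 'ደ', 'e': 'ኤ', 'f': 'ፈ', 'g': 'ገ', 'h': 'ሀ',
--         'i': 'ኢ', 'j': 'ጀ', 'k': 'ከ', 'l': 'ለ', 'm': 'መ', 'n': 'ነ', 'o': 'ኦ', 'p': 'ፐ',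
--         'q': 'ቀ', 'r': 'ረ', 's': 'ሰ', 't': 'ተ', 'u': 'ኡ', 'v': 'ቨ', 'w': 'ወ', 'x': 'ክስ',
--         'y': 'የ', 'z': 'ዘ', 'sh': 'ሸ', 'ch': 'ቸ', 'gn': 'ኝ', 'nh': 'ኝ'
--     }
--     am = en_name.lower()
--     for en, amh in sorted(mapping.items(), key=lambda x: len(x[0]), reverse=True):
--         am = am.replace(en, amh)
--     return am
-- ===== SOURCE B (Python) =====
-- def transliterate_to_amharic(en_name):
--     """Basic fallback transliteration for names if Amharic crop fails."""
--     if not en_name or en_name == "—":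
--         return "—"
--     two = {('s', 'h'): 'ሸ', ('c', 'h'): 'ቸ', ('g', 'n'): 'ኝ', ('n', 'h'): 'ኝ'}
--     one = {'a': 'አ', 'b': 'በ', 'c': 'ከ', 'd': 'ደ', 'e': 'ኤ', 'f': 'ፈ', 'g': 'ገ',
--            'h': 'ሀ', 'i': 'ኢ', 'j': 'ጀ', 'k': 'ከ', 'l': 'ለ', 'm': 'መ', 'n': 'ነ',
--            'o': 'ኦ', 'p': 'ፐ', 'q': 'ቀ', 'r': 'ረ', 's': 'ሰ', 't': 'ተ', 'u': 'ኡ',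
--            'v': 'ቨ', 'w': 'ወ', 'x': 'ክስ', 'y': 'የ', 'z': 'ዘ'}
--     s = en_name.lower()
--     out = []
--     i = 0
--     n = len(s)
--     while i < n:
--         g = two.get((s[i], s[i + 1])) if i + 1 < n else None
--         if g is not None:
--             out.append(g)
--             i += 2
--         else:
--             ch = s[i]
--             out.append(one.get(ch, ch))
--             i += 1
--     return ''.join(out)
-- ===== Notes on version B (the rewrite author's own statement) =====
-- stated objective: alternative
-- what changed: Replaces A's 30 sequential full-string str.replace passes by a single left-to-right scan with a one-character lookahead for the four digraphs (sh/ch/gn/nh) and a dict lookup per character; equal because the digraph rule order matches leftmost-greedy and all output glyphs are non-ASCII so no pass can cascade into another; the dict lookups trade A's repeated C-level replace passes for one Python-level pass.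
import Mathlib
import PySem

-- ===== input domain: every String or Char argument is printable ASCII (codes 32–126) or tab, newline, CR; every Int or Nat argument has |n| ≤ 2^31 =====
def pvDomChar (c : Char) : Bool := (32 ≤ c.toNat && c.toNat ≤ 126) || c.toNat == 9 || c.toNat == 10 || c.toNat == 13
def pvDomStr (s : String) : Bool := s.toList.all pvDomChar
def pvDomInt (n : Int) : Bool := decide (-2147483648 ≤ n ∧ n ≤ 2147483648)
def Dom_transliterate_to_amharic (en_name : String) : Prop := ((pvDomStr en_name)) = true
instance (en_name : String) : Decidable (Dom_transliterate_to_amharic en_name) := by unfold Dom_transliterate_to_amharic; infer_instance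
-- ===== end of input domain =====

-- B replaces A's 30 sequential full-string replace passes by a single left-to-right scan
-- with a one-character lookahead for the four digraphs (objective: alternative algorithm).

-- ===== PORT A =====
def transliterate_to_amharic (en_name : String) : String :=
  if en_name = "" ∨ en_name = "—" then "—"
  else
    let mapping : PySem.Dict String String := PySem.Dict.mk [("a", "አ"), ("b", "በ"), ("c", "ከ"), ("d", "ደ"), ("e", "ኤ"), ("f", "ፈ"), ("g", "ገ"), ("h", "ሀ"), ("i", "ኢ"), ("j", "ጀ"), ("k", "ከ"), ("l", "ለ"), ("m", "መ"), ("n", "ነ"), ("o", "ኦ"), ("p", "ፐ"), ("q", "ቀ"), ("r", "ረ"), ("s", "ሰ"), ("t", "ተ"), ("u", "ኡ"), ("v", "ቨ"), ("w", "ወ"), ("x", "ክስ"), ("y", "የ"), ("z", "ዘ"), ("sh", "ሸ"), ("ch", "ቸ"), ("gn", "ኝ"), ("nh", "ኝ")]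
    let am := PySem.Str.lower en_name
    (PySem.List.sorted (PySem.Dict.items mapping) (fun x => (PySem.Str.len x.1 : Int)) true).foldl
      (fun am p => PySem.Str.replace am p.1 p.2) am

-- ===== PORT B =====
-- Source B's `two` dict, keyed by the pair (s[i], s[i+1]) (Python chars port to Char)
def pvTwoB : PySem.Dict (Char × Char) String :=
  PySem.Dict.mk [(('s', 'h'), "ሸ"), (('c', 'h'), "ቸ"), (('g', 'n'), "ኝ"), (('n', 'h'), "ኝ")]

-- Source B's `one` dict
def pvOneB : PySem.Dict Char String := PySem.Dict.mk [('a', "አ"), ('b', "በ"), ('c', "ከ"), ('d', "ደ"), ('e', "ኤ"), ('f', "ፈ"), ('g', "ገ"), ('h', "ሀ"), ('i', "ኢ"), ('j', "ጀ"), ('k', "ከ"), ('l', "ለ"), ('m', "መ"), ('n', "ነ"), ('o', "ኦ"), ('p', "ፐ"), ('q', "ቀ"), ('r', "ረ"), ('s', "ሰ"), ('t', "ተ"), ('u', "ኡ"), ('v', "ቨ"), ('w', "ወ"), ('x', "ክስ"), ('y', "የ"), ('z', "ዘ")]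

-- Source B's while loop over the suffix of the string starting at index i
def pvScanB : List Char → List String
  | [] => []
  | [c] => [PySem.Dict.getD pvOneB c (String.ofList [c])]
  | c1 :: c2 :: t =>
    match PySem.Dict.get? pvTwoB (c1, c2) with
    | some g => g :: pvScanB t
    | none => PySem.Dict.getD pvOneB c1 (String.ofList [c1]) :: pvScanB (c2 :: t)

def transliterate_to_amharic_alt (en_name : String) : String :=
  if en_name = "" ∨ en_name = "—" then "—"
  else PySem.Str.join "" (pvScanB (PySem.Str.lower en_name).toList)

-- ===== PRECONDITION & SPEC =====
def Spec_transliterate_to_amharic (en_name : String) (out : String) : Prop := out = transliterate_to_amharic_alt en_name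
instance (en_name : String) (out : String) : Decidable (Spec_transliterate_to_amharic en_name out) := by unfold Spec_transliterate_to_amharic; infer_instance

-- ===== CLAIM (what is proved, stated in full; the proofs are below) =====
def Claim_equal_transliterate_to_amharic : Prop := ∀ (en_name : String), Dom_transliterate_to_amharic en_name → Spec_transliterate_to_amharic en_name (transliterate_to_amharic en_name)

-- ===== LEMMAS AND PROOFS =====

-- A clean view of Python's str.replace for a NONEMPTY pattern o :: pat.
def pvRep (o : Char) (pat new : List Char) : List Char → List Char
  | [] => []
  | c :: t =>
    if o = c ∧ pat.isPrefixOf t then new ++ pvRep o pat new (t.drop pat.length)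
    else c :: pvRep o pat new t
termination_by s => s.length
decreasing_by
  · simp [List.length_drop]
  · simp

theorem pvRep_nil (o : Char) (pat new : List Char) : pvRep o pat new [] = [] := by
  rw [pvRep]

theorem pvRep_pos (o : Char) (pat new t : List Char) (h : pat.isPrefixOf t) :
    pvRep o pat new (o :: t) = new ++ pvRep o pat new (t.drop pat.length) := by
  rw [pvRep]; simp [h]

theorem pvRep_neg (o c : Char) (pat new t : List Char) (h : ¬(o = c ∧ pat.isPrefixOf t = true)) :
    pvRep o pat new (c :: t) = c :: pvRep o pat new t := by
  rw [pvRep]; simp only [if_neg h]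

theorem pvGo_eq_rep (o : Char) (pat new : List Char) :
    ∀ (fuel : Nat) (s acc : List Char), s.length ≤ fuel →
      PySem.Chars.replace.go (o :: pat) new fuel s acc = acc.reverse ++ pvRep o pat new s := by
  intro fuel
  induction fuel with
  | zero =>
    intro s acc h
    have hs : s = [] := List.length_eq_zero_iff.mp (Nat.le_zero.mp h)
    subst hs
    rw [PySem.Chars.replace.go, pvRep_nil]
    try simp
  | succ n ih =>
    intro s acc h
    cases s with
    | nil =>
      rw [PySem.Chars.replace.go]
      · rw [pvRep_nil]; simp
      · omega
    | cons c t =>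
      rw [PySem.Chars.replace.go]
      by_cases hp : (o :: pat).isPrefixOf (c :: t) = true
      · have hoc : o = c ∧ pat <+: t := by
          simpa [List.isPrefixOf_iff_prefix, List.cons_prefix_cons] using hp
        obtain ⟨ho, hpt⟩ := hoc
        have hpt' : pat.isPrefixOf t = true := by
          simpa [List.isPrefixOf_iff_prefix] using hpt
        rw [if_pos hp]
        have hd : (c :: t).drop (o :: pat).length = t.drop pat.length := by simp
        have hlen : (t.drop pat.length).length ≤ n := by
          simp only [List.length_cons] at h
          simp [List.length_drop]; omega
        rw [hd, ih _ _ hlen]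
        rw [ho, pvRep_pos c pat new t hpt']
        simp
      · rw [if_neg hp]
        have hlen : t.length ≤ n := by
          simp only [List.length_cons] at h; omega
        rw [ih _ _ hlen, pvRep_neg o c pat new t]
        · simp
        · intro hcc
          apply hp
          simp [List.isPrefixOf_iff_prefix, hcc.1,
            (by simpa [List.isPrefixOf_iff_prefix] using hcc.2 : pat <+: t)]

theorem pvReplace_eq_rep (o : Char) (pat new s : List Char) :
    PySem.Chars.replace s (o :: pat) new = pvRep o pat new s := by
  rw [PySem.Chars.replace.eq_def]
  simp only [List.isEmpty_cons, if_neg Bool.false_ne_true]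
  simpa using pvGo_eq_rep o pat new s.length s [] (le_refl _)

-- a replace pass moves the head of the string to either the old head or the head of `new`
theorem pvHead_rep (o : Char) (pat : List Char) (g : Char) (s : List Char) :
    (pvRep o pat [g] s).head? = s.head? ∨ (pvRep o pat [g] s).head? = some g := by
  cases s with
  | nil => left; rw [pvRep_nil]
  | cons c t =>
    by_cases h : o = c ∧ pat.isPrefixOf t = true
    · right
      obtain ⟨ho, hpt⟩ := h
      subst ho
      rw [pvRep_pos o pat [g] t hpt]
      rfl
    · left
      rw [pvRep_neg o c pat [g] t h]
      rfl

theorem pvIsPrefixOf_single (d : Char) (l : List Char) :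
    ([d].isPrefixOf l = true) ↔ l.head? = some d := by
  cases l with
  | nil => simp [List.isPrefixOf]
  | cons x xs =>
    simp [List.isPrefixOf]
    exact eq_comm

-- a single-character replace pass is a flatMap
theorem pvRep_single (d : Char) (new : List Char) (s : List Char) :
    pvRep d [] new s = s.flatMap (fun c => if d = c then new else [c]) := by
  induction s with
  | nil => rw [pvRep_nil]; rfl
  | cons c t ih =>
    by_cases h : d = c
    · subst h
      rw [pvRep_pos d [] new t (by simp [List.isPrefixOf])]
      simp [ih]
    · rw [pvRep_neg d c [] new t (by simp [h])]
      simp [h, ih]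

theorem pvRep_single_append (d : Char) (new x y : List Char) :
    pvRep d [] new (x ++ y) = pvRep d [] new x ++ pvRep d [] new y := by
  simp [pvRep_single]

-- B's digraph pass, isolated (proof-side helper)
def pvDigr : List Char → List Char
  | [] => []
  | [c] => [c]
  | c1 :: c2 :: t =>
    if c1 = 's' ∧ c2 = 'h' then 'ሸ' :: pvDigr t
    else if c1 = 'c' ∧ c2 = 'h' then 'ቸ' :: pvDigr t
    else if c1 = 'g' ∧ c2 = 'n' then 'ኝ' :: pvDigr t
    else if c1 = 'n' ∧ c2 = 'h' then 'ኝ' :: pvDigr t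
    else c1 :: pvDigr (c2 :: t)
termination_by s => s.length

-- the four digraph replace passes of A, in A's order
def pvChain2 (s : List Char) : List Char :=
  pvRep 'n' ['h'] ['ኝ'] (pvRep 'g' ['n'] ['ኝ'] (pvRep 'c' ['h'] ['ቸ'] (pvRep 's' ['h'] ['ሸ'] s)))

-- the 26 single-character replace passes of A, in A's order
def pvRules1 : List (Char × List Char) := [('a', ['አ']), ('b', ['በ']), ('c', ['ከ']), ('d', ['ደ']), ('e', ['ኤ']), ('f', ['ፈ']), ('g', ['ገ']), ('h', ['ሀ']), ('i', ['ኢ']), ('j', ['ጀ']), ('k', ['ከ']), ('l', ['ለ']), ('m', ['መ']), ('n', ['ነ']), ('o', ['ኦ']), ('p', ['ፐ']), ('q', ['ቀ']), ('r', ['ረ']), ('s', ['ሰ']), ('t', ['ተ']), ('u', ['ኡ']), ('v', ['ቨ']), ('w', ['ወ']), ('x', ['ክ', 'ስ']), ('y', ['የ']), ('z', ['ዘ'])]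
def pvChain1 (s : List Char) : List Char :=
  pvRules1.foldl (fun a r => pvRep r.1 [] r.2 a) s

def pvOneSub (c : Char) : List Char := (PySem.Dict.getD pvOneB c (String.ofList [c])).toList

theorem pvRep_ne (o c : Char) (pat new t : List Char) (h : o ≠ c) :
    pvRep o pat new (c :: t) = c :: pvRep o pat new t :=
  pvRep_neg o c pat new t (fun hc => h hc.1)

theorem pvChain2_sh (t : List Char) : pvChain2 ('s' :: 'h' :: t) = 'ሸ' :: pvChain2 t := by
  unfold pvChain2
  rw [pvRep_pos 's' ['h'] ['ሸ'] ('h' :: t) (by simp [List.isPrefixOf])]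
  simp only [List.length_cons, List.length_nil, List.drop_succ_cons, List.drop_zero,
    List.singleton_append]
  rw [pvRep_ne 'c' 'ሸ' _ _ _ (by decide), pvRep_ne 'g' 'ሸ' _ _ _ (by decide),
    pvRep_ne 'n' 'ሸ' _ _ _ (by decide)]

theorem pvChain2_ch (t : List Char) : pvChain2 ('c' :: 'h' :: t) = 'ቸ' :: pvChain2 t := by
  unfold pvChain2
  rw [pvRep_ne 's' 'c' _ _ _ (by decide), pvRep_ne 's' 'h' _ _ _ (by decide)]
  rw [pvRep_pos 'c' ['h'] ['ቸ'] ('h' :: pvRep 's' ['h'] ['ሸ'] t)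
    ((pvIsPrefixOf_single 'h' _).mpr rfl)]
  simp only [List.length_cons, List.length_nil, List.drop_succ_cons, List.drop_zero,
    List.singleton_append]
  rw [pvRep_ne 'g' 'ቸ' _ _ _ (by decide), pvRep_ne 'n' 'ቸ' _ _ _ (by decide)]

theorem pvChain2_gn (t : List Char) : pvChain2 ('g' :: 'n' :: t) = 'ኝ' :: pvChain2 t := by
  unfold pvChain2
  rw [pvRep_ne 's' 'g' _ _ _ (by decide), pvRep_ne 's' 'n' _ _ _ (by decide)]
  rw [pvRep_ne 'c' 'g' _ _ _ (by decide), pvRep_ne 'c' 'n' _ _ _ (by decide)]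
  rw [pvRep_pos 'g' ['n'] ['ኝ'] ('n' :: pvRep 'c' ['h'] ['ቸ'] (pvRep 's' ['h'] ['ሸ'] t))
    ((pvIsPrefixOf_single 'n' _).mpr rfl)]
  simp only [List.length_cons, List.length_nil, List.drop_succ_cons, List.drop_zero,
    List.singleton_append]
  rw [pvRep_ne 'n' 'ኝ' _ _ _ (by decide)]

theorem pvChain2_nh (t : List Char) : pvChain2 ('n' :: 'h' :: t) = 'ኝ' :: pvChain2 t := by
  unfold pvChain2
  rw [pvRep_ne 's' 'n' _ _ _ (by decide), pvRep_ne 's' 'h' _ _ _ (by decide)]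
  rw [pvRep_ne 'c' 'n' _ _ _ (by decide), pvRep_ne 'c' 'h' _ _ _ (by decide)]
  rw [pvRep_ne 'g' 'n' _ _ _ (by decide), pvRep_ne 'g' 'h' _ _ _ (by decide)]
  rw [pvRep_pos 'n' ['h'] ['ኝ'] ('h' :: pvRep 'g' ['n'] ['ኝ'] (pvRep 'c' ['h'] ['ቸ'] (pvRep 's' ['h'] ['ሸ'] t)))
    ((pvIsPrefixOf_single 'h' _).mpr rfl)]
  simp only [List.length_cons, List.length_nil, List.drop_succ_cons, List.drop_zero,
    List.singleton_append]

theorem pvChain2_default (c1 c2 : Char) (t : List Char)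
    (h1 : ¬(c1 = 's' ∧ c2 = 'h')) (h2 : ¬(c1 = 'c' ∧ c2 = 'h'))
    (h3 : ¬(c1 = 'g' ∧ c2 = 'n')) (h4 : ¬(c1 = 'n' ∧ c2 = 'h')) :
    pvChain2 (c1 :: c2 :: t) = c1 :: pvChain2 (c2 :: t) := by
  unfold pvChain2
  rw [pvRep_neg 's' c1 ['h'] ['ሸ'] (c2 :: t) ?hs]
  rw [pvRep_neg 'c' c1 ['h'] ['ቸ'] _ ?hc]
  rw [pvRep_neg 'g' c1 ['n'] ['ኝ'] _ ?hg]
  rw [pvRep_neg 'n' c1 ['h'] ['ኝ'] _ ?hn]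
  case hs =>
    rintro ⟨e, hp⟩
    have hc2 : c2 = 'h' := by simpa using (pvIsPrefixOf_single 'h' _).mp hp
    exact h1 ⟨e.symm, hc2⟩
  case hc =>
    rintro ⟨e, hp⟩
    have hh := (pvIsPrefixOf_single 'h' _).mp hp
    rcases pvHead_rep 's' ['h'] 'ሸ' (c2 :: t) with hx | hx <;> rw [hx] at hh
    · exact h2 ⟨e.symm, by simpa using hh⟩
    · simp at hh
  case hg =>
    rintro ⟨e, hp⟩
    have hh := (pvIsPrefixOf_single 'n' _).mp hp
    rcases pvHead_rep 'c' ['h'] 'ቸ' _ with hx | hx <;> rw [hx] at hh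
    · rcases pvHead_rep 's' ['h'] 'ሸ' (c2 :: t) with hy | hy <;> rw [hy] at hh
      · exact h3 ⟨e.symm, by simpa using hh⟩
      · simp at hh
    · simp at hh
  case hn =>
    rintro ⟨e, hp⟩
    have hh := (pvIsPrefixOf_single 'h' _).mp hp
    rcases pvHead_rep 'g' ['n'] 'ኝ' _ with hx | hx <;> rw [hx] at hh
    · rcases pvHead_rep 'c' ['h'] 'ቸ' _ with hy | hy <;> rw [hy] at hh
      · rcases pvHead_rep 's' ['h'] 'ሸ' (c2 :: t) with hz | hz <;> rw [hz] at hh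
        · exact h4 ⟨e.symm, by simpa using hh⟩
        · simp at hh
      · simp at hh
    · simp at hh

theorem pvChain2_eq_digr (s : List Char) : pvChain2 s = pvDigr s := by
  have main : ∀ (n : Nat) (s : List Char), s.length ≤ n → pvChain2 s = pvDigr s := by
    intro n
    induction n with
    | zero =>
      intro s h
      have hs : s = [] := List.length_eq_zero_iff.mp (Nat.le_zero.mp h)
      subst hs
      unfold pvChain2
      simp only [pvRep_nil]
      rw [pvDigr]
    | succ n ih =>
      intro s h
      match s with
      | [] =>
        unfold pvChain2
        simp only [pvRep_nil]
        rw [pvDigr]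
      | [c] =>
        have hone : ∀ (o p g : Char), pvRep o [p] [g] [c] = [c] := by
          intro o p g
          rw [pvRep_neg o c [p] [g] [] (by simp [List.isPrefixOf]), pvRep_nil]
        unfold pvChain2
        rw [hone, hone, hone, hone, pvDigr]
      | c1 :: c2 :: t =>
        have ht : t.length ≤ n := by
          simp only [List.length_cons] at h; omega
        have ht2 : (c2 :: t).length ≤ n := by
          simp only [List.length_cons] at h ⊢; omega
        by_cases h1 : c1 = 's' ∧ c2 = 'h'
        · obtain ⟨e1, e2⟩ := h1; subst e1; subst e2
          rw [pvChain2_sh, ih t ht, pvDigr, if_pos ⟨rfl, rfl⟩]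
        · by_cases h2 : c1 = 'c' ∧ c2 = 'h'
          · obtain ⟨e1, e2⟩ := h2; subst e1; subst e2
            rw [pvChain2_ch, ih t ht, pvDigr, if_neg (by simp), if_pos ⟨rfl, rfl⟩]
          · by_cases h3 : c1 = 'g' ∧ c2 = 'n'
            · obtain ⟨e1, e2⟩ := h3; subst e1; subst e2
              rw [pvChain2_gn, ih t ht, pvDigr, if_neg (by simp), if_neg (by simp),
                if_pos ⟨rfl, rfl⟩]
            · by_cases h4 : c1 = 'n' ∧ c2 = 'h'
              · obtain ⟨e1, e2⟩ := h4; subst e1; subst e2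
                rw [pvChain2_nh, ih t ht, pvDigr, if_neg (by simp), if_neg (by simp),
                  if_neg (by simp), if_pos ⟨rfl, rfl⟩]
              · rw [pvChain2_default c1 c2 t h1 h2 h3 h4, ih (c2 :: t) ht2, pvDigr,
                  if_neg h1, if_neg h2, if_neg h3, if_neg h4]
  exact main s.length s (le_refl _)

theorem pvFoldl_rep_nil (rs : List (Char × List Char)) :
    rs.foldl (fun a r => pvRep r.1 [] r.2 a) [] = [] := by
  induction rs with
  | nil => rfl
  | cons r rest ih => simp only [List.foldl, pvRep_nil]; exact ih

theorem pvFoldl_rep_append (rs : List (Char × List Char)) (x y : List Char) :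
    rs.foldl (fun a r => pvRep r.1 [] r.2 a) (x ++ y)
      = rs.foldl (fun a r => pvRep r.1 [] r.2 a) x
        ++ rs.foldl (fun a r => pvRep r.1 [] r.2 a) y := by
  induction rs generalizing x y with
  | nil => rfl
  | cons r rest ih => simp only [List.foldl, pvRep_single_append]; exact ih _ _

theorem pvChain1_nil : pvChain1 [] = [] := pvFoldl_rep_nil pvRules1

theorem pvChain1_append (x y : List Char) : pvChain1 (x ++ y) = pvChain1 x ++ pvChain1 y :=
  pvFoldl_rep_append pvRules1 x y

theorem pvChain1_single (c : Char) : pvChain1 [c] = pvOneSub c := by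
  by_cases ha : c = 'a'
  · subst ha
    show pvRules1.foldl (fun a r => pvRep r.1 [] r.2 a) ['a'] = pvOneSub 'a'
    simp only [pvRules1, List.foldl, pvRep_single]
    decide
  by_cases hb : c = 'b'
  · subst hb
    show pvRules1.foldl (fun a r => pvRep r.1 [] r.2 a) ['b'] = pvOneSub 'b'
    simp only [pvRules1, List.foldl, pvRep_single]
    decide
  by_cases hc : c = 'c'
  · subst hc
    show pvRules1.foldl (fun a r => pvRep r.1 [] r.2 a) ['c'] = pvOneSub 'c'
    simp only [pvRules1, List.foldl, pvRep_single]
    decide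
  by_cases hd : c = 'd'
  · subst hd
    show pvRules1.foldl (fun a r => pvRep r.1 [] r.2 a) ['d'] = pvOneSub 'd'
    simp only [pvRules1, List.foldl, pvRep_single]
    decide
  by_cases he : c = 'e'
  · subst he
    show pvRules1.foldl (fun a r => pvRep r.1 [] r.2 a) ['e'] = pvOneSub 'e'
    simp only [pvRules1, List.foldl, pvRep_single]
    decide
  by_cases hf : c = 'f'
  · subst hf
    show pvRules1.foldl (fun a r => pvRep r.1 [] r.2 a) ['f'] = pvOneSub 'f'
    simp only [pvRules1, List.foldl, pvRep_single]
    decide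
  by_cases hg : c = 'g'
  · subst hg
    show pvRules1.foldl (fun a r => pvRep r.1 [] r.2 a) ['g'] = pvOneSub 'g'
    simp only [pvRules1, List.foldl, pvRep_single]
    decide
  by_cases hh : c = 'h'
  · subst hh
    show pvRules1.foldl (fun a r => pvRep r.1 [] r.2 a) ['h'] = pvOneSub 'h'
    simp only [pvRules1, List.foldl, pvRep_single]
    decide
  by_cases hi : c = 'i'
  · subst hi
    show pvRules1.foldl (fun a r => pvRep r.1 [] r.2 a) ['i'] = pvOneSub 'i'
    simp only [pvRules1, List.foldl, pvRep_single]
    decide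
  by_cases hj : c = 'j'
  · subst hj
    show pvRules1.foldl (fun a r => pvRep r.1 [] r.2 a) ['j'] = pvOneSub 'j'
    simp only [pvRules1, List.foldl, pvRep_single]
    decide
  by_cases hk : c = 'k'
  · subst hk
    show pvRules1.foldl (fun a r => pvRep r.1 [] r.2 a) ['k'] = pvOneSub 'k'
    simp only [pvRules1, List.foldl, pvRep_single]
    decide
  by_cases hl : c = 'l'
  · subst hl
    show pvRules1.foldl (fun a r => pvRep r.1 [] r.2 a) ['l'] = pvOneSub 'l'
    simp only [pvRules1, List.foldl, pvRep_single]
    decide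
  by_cases hm : c = 'm'
  · subst hm
    show pvRules1.foldl (fun a r => pvRep r.1 [] r.2 a) ['m'] = pvOneSub 'm'
    simp only [pvRules1, List.foldl, pvRep_single]
    decide
  by_cases hn : c = 'n'
  · subst hn
    show pvRules1.foldl (fun a r => pvRep r.1 [] r.2 a) ['n'] = pvOneSub 'n'
    simp only [pvRules1, List.foldl, pvRep_single]
    decide
  by_cases ho : c = 'o'
  · subst ho
    show pvRules1.foldl (fun a r => pvRep r.1 [] r.2 a) ['o'] = pvOneSub 'o'
    simp only [pvRules1, List.foldl, pvRep_single]
    decide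
  by_cases hp : c = 'p'
  · subst hp
    show pvRules1.foldl (fun a r => pvRep r.1 [] r.2 a) ['p'] = pvOneSub 'p'
    simp only [pvRules1, List.foldl, pvRep_single]
    decide
  by_cases hq : c = 'q'
  · subst hq
    show pvRules1.foldl (fun a r => pvRep r.1 [] r.2 a) ['q'] = pvOneSub 'q'
    simp only [pvRules1, List.foldl, pvRep_single]
    decide
  by_cases hr : c = 'r'
  · subst hr
    show pvRules1.foldl (fun a r => pvRep r.1 [] r.2 a) ['r'] = pvOneSub 'r'
    simp only [pvRules1, List.foldl, pvRep_single]
    decide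
  by_cases hs : c = 's'
  · subst hs
    show pvRules1.foldl (fun a r => pvRep r.1 [] r.2 a) ['s'] = pvOneSub 's'
    simp only [pvRules1, List.foldl, pvRep_single]
    decide
  by_cases ht : c = 't'
  · subst ht
    show pvRules1.foldl (fun a r => pvRep r.1 [] r.2 a) ['t'] = pvOneSub 't'
    simp only [pvRules1, List.foldl, pvRep_single]
    decide
  by_cases hu : c = 'u'
  · subst hu
    show pvRules1.foldl (fun a r => pvRep r.1 [] r.2 a) ['u'] = pvOneSub 'u'
    simp only [pvRules1, List.foldl, pvRep_single]
    decide
  by_cases hv : c = 'v'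
  · subst hv
    show pvRules1.foldl (fun a r => pvRep r.1 [] r.2 a) ['v'] = pvOneSub 'v'
    simp only [pvRules1, List.foldl, pvRep_single]
    decide
  by_cases hw : c = 'w'
  · subst hw
    show pvRules1.foldl (fun a r => pvRep r.1 [] r.2 a) ['w'] = pvOneSub 'w'
    simp only [pvRules1, List.foldl, pvRep_single]
    decide
  by_cases hx : c = 'x'
  · subst hx
    show pvRules1.foldl (fun a r => pvRep r.1 [] r.2 a) ['x'] = pvOneSub 'x'
    simp only [pvRules1, List.foldl, pvRep_single]
    decide
  by_cases hy : c = 'y'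
  · subst hy
    show pvRules1.foldl (fun a r => pvRep r.1 [] r.2 a) ['y'] = pvOneSub 'y'
    simp only [pvRules1, List.foldl, pvRep_single]
    decide
  by_cases hz : c = 'z'
  · subst hz
    show pvRules1.foldl (fun a r => pvRep r.1 [] r.2 a) ['z'] = pvOneSub 'z'
    simp only [pvRules1, List.foldl, pvRep_single]
    decide
  -- c is not one of the 26 mapped letters: every pass keeps [c], and the dict lookup misses
  have step : ∀ (d : Char) (g : List Char), d ≠ c → pvRep d [] g [c] = [c] := by
    intro d g hd
    rw [pvRep_neg d c [] g [] (fun hc => hd hc.1), pvRep_nil]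
  show pvRules1.foldl (fun a r => pvRep r.1 [] r.2 a) [c] = pvOneSub c
  simp only [pvRules1, List.foldl]
  rw [step 'a' _ (fun pvH => ha pvH.symm)]
  rw [step 'b' _ (fun pvH => hb pvH.symm)]
  rw [step 'c' _ (fun pvH => hc pvH.symm)]
  rw [step 'd' _ (fun pvH => hd pvH.symm)]
  rw [step 'e' _ (fun pvH => he pvH.symm)]
  rw [step 'f' _ (fun pvH => hf pvH.symm)]
  rw [step 'g' _ (fun pvH => hg pvH.symm)]
  rw [step 'h' _ (fun pvH => hh pvH.symm)]
  rw [step 'i' _ (fun pvH => hi pvH.symm)]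
  rw [step 'j' _ (fun pvH => hj pvH.symm)]
  rw [step 'k' _ (fun pvH => hk pvH.symm)]
  rw [step 'l' _ (fun pvH => hl pvH.symm)]
  rw [step 'm' _ (fun pvH => hm pvH.symm)]
  rw [step 'n' _ (fun pvH => hn pvH.symm)]
  rw [step 'o' _ (fun pvH => ho pvH.symm)]
  rw [step 'p' _ (fun pvH => hp pvH.symm)]
  rw [step 'q' _ (fun pvH => hq pvH.symm)]
  rw [step 'r' _ (fun pvH => hr pvH.symm)]
  rw [step 's' _ (fun pvH => hs pvH.symm)]
  rw [step 't' _ (fun pvH => ht pvH.symm)]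
  rw [step 'u' _ (fun pvH => hu pvH.symm)]
  rw [step 'v' _ (fun pvH => hv pvH.symm)]
  rw [step 'w' _ (fun pvH => hw pvH.symm)]
  rw [step 'x' _ (fun pvH => hx pvH.symm)]
  rw [step 'y' _ (fun pvH => hy pvH.symm)]
  rw [step 'z' _ (fun pvH => hz pvH.symm)]
  unfold pvOneSub pvOneB
  simp only [PySem.Dict.get?_mk_cons, PySem.Dict.getD]
  rw [if_neg (fun pvH => ha (beq_iff_eq.mp pvH).symm)]
  rw [if_neg (fun pvH => hb (beq_iff_eq.mp pvH).symm)]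
  rw [if_neg (fun pvH => hc (beq_iff_eq.mp pvH).symm)]
  rw [if_neg (fun pvH => hd (beq_iff_eq.mp pvH).symm)]
  rw [if_neg (fun pvH => he (beq_iff_eq.mp pvH).symm)]
  rw [if_neg (fun pvH => hf (beq_iff_eq.mp pvH).symm)]
  rw [if_neg (fun pvH => hg (beq_iff_eq.mp pvH).symm)]
  rw [if_neg (fun pvH => hh (beq_iff_eq.mp pvH).symm)]
  rw [if_neg (fun pvH => hi (beq_iff_eq.mp pvH).symm)]
  rw [if_neg (fun pvH => hj (beq_iff_eq.mp pvH).symm)]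
  rw [if_neg (fun pvH => hk (beq_iff_eq.mp pvH).symm)]
  rw [if_neg (fun pvH => hl (beq_iff_eq.mp pvH).symm)]
  rw [if_neg (fun pvH => hm (beq_iff_eq.mp pvH).symm)]
  rw [if_neg (fun pvH => hn (beq_iff_eq.mp pvH).symm)]
  rw [if_neg (fun pvH => ho (beq_iff_eq.mp pvH).symm)]
  rw [if_neg (fun pvH => hp (beq_iff_eq.mp pvH).symm)]
  rw [if_neg (fun pvH => hq (beq_iff_eq.mp pvH).symm)]
  rw [if_neg (fun pvH => hr (beq_iff_eq.mp pvH).symm)]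
  rw [if_neg (fun pvH => hs (beq_iff_eq.mp pvH).symm)]
  rw [if_neg (fun pvH => ht (beq_iff_eq.mp pvH).symm)]
  rw [if_neg (fun pvH => hu (beq_iff_eq.mp pvH).symm)]
  rw [if_neg (fun pvH => hv (beq_iff_eq.mp pvH).symm)]
  rw [if_neg (fun pvH => hw (beq_iff_eq.mp pvH).symm)]
  rw [if_neg (fun pvH => hx (beq_iff_eq.mp pvH).symm)]
  rw [if_neg (fun pvH => hy (beq_iff_eq.mp pvH).symm)]
  rw [if_neg (fun pvH => hz (beq_iff_eq.mp pvH).symm)]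
  simp [PySem.Dict.get?]

theorem pvChain1_flatMap (s : List Char) : pvChain1 s = s.flatMap pvOneSub := by
  induction s with
  | nil => exact pvChain1_nil
  | cons c t ih =>
    have : (c :: t) = [c] ++ t := rfl
    rw [this, pvChain1_append, pvChain1_single, ih]
    rfl

theorem pvScanB_flat (s : List Char) :
    ((pvScanB s).map String.toList).flatten = (pvDigr s).flatMap pvOneSub := by
  have main : ∀ (n : Nat) (s : List Char), s.length ≤ n →
      ((pvScanB s).map String.toList).flatten = (pvDigr s).flatMap pvOneSub := by
    intro n
    induction n with
    | zero =>
      intro s h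
      have hs : s = [] := List.length_eq_zero_iff.mp (Nat.le_zero.mp h)
      subst hs
      rw [pvScanB, pvDigr]
      rfl
    | succ n ih =>
      intro s h
      match s with
      | [] => rw [pvScanB, pvDigr]; rfl
      | [c] =>
        rw [pvScanB, pvDigr]
        simp [pvOneSub]
      | c1 :: c2 :: t =>
        have ht : t.length ≤ n := by
          simp only [List.length_cons] at h; omega
        have ht2 : (c2 :: t).length ≤ n := by
          simp only [List.length_cons] at h ⊢; omega
        by_cases h1 : c1 = 's' ∧ c2 = 'h'
        · obtain ⟨e1, e2⟩ := h1; subst e1; subst e2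
          rw [pvScanB]
          have hget : PySem.Dict.get? pvTwoB ('s', 'h') = some "ሸ" := by decide
          rw [hget, pvDigr, if_pos ⟨rfl, rfl⟩]
          simp only [List.map_cons, List.flatten_cons, List.flatMap_cons, ih t ht]
          congr 1
        · by_cases h2 : c1 = 'c' ∧ c2 = 'h'
          · obtain ⟨e1, e2⟩ := h2; subst e1; subst e2
            rw [pvScanB]
            have hget : PySem.Dict.get? pvTwoB ('c', 'h') = some "ቸ" := by decide
            rw [hget, pvDigr, if_neg (by simp), if_pos ⟨rfl, rfl⟩]
            simp only [List.map_cons, List.flatten_cons, List.flatMap_cons, ih t ht]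
            congr 1
          · by_cases h3 : c1 = 'g' ∧ c2 = 'n'
            · obtain ⟨e1, e2⟩ := h3; subst e1; subst e2
              rw [pvScanB]
              have hget : PySem.Dict.get? pvTwoB ('g', 'n') = some "ኝ" := by decide
              rw [hget, pvDigr, if_neg (by simp), if_neg (by simp), if_pos ⟨rfl, rfl⟩]
              simp only [List.map_cons, List.flatten_cons, List.flatMap_cons, ih t ht]
              congr 1
            · by_cases h4 : c1 = 'n' ∧ c2 = 'h'
              · obtain ⟨e1, e2⟩ := h4; subst e1; subst e2
                rw [pvScanB]
                have hget : PySem.Dict.get? pvTwoB ('n', 'h') = some "ኝ" := by decide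
                rw [hget, pvDigr, if_neg (by simp), if_neg (by simp), if_neg (by simp),
                  if_pos ⟨rfl, rfl⟩]
                simp only [List.map_cons, List.flatten_cons, List.flatMap_cons, ih t ht]
                congr 1
              · have hget : PySem.Dict.get? pvTwoB (c1, c2) = none := by
                  simp only [pvTwoB, PySem.Dict.get?_mk_cons]
                  rw [if_neg, if_neg, if_neg, if_neg]
                  · rfl
                  · intro hb
                    exact h4 ⟨(Prod.mk.injEq _ _ _ _ ▸ (beq_iff_eq.mp hb)).1.symm,
                      (Prod.mk.injEq _ _ _ _ ▸ (beq_iff_eq.mp hb)).2.symm⟩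
                  · intro hb
                    exact h3 ⟨(Prod.mk.injEq _ _ _ _ ▸ (beq_iff_eq.mp hb)).1.symm,
                      (Prod.mk.injEq _ _ _ _ ▸ (beq_iff_eq.mp hb)).2.symm⟩
                  · intro hb
                    exact h2 ⟨(Prod.mk.injEq _ _ _ _ ▸ (beq_iff_eq.mp hb)).1.symm,
                      (Prod.mk.injEq _ _ _ _ ▸ (beq_iff_eq.mp hb)).2.symm⟩
                  · intro hb
                    exact h1 ⟨(Prod.mk.injEq _ _ _ _ ▸ (beq_iff_eq.mp hb)).1.symm,
                      (Prod.mk.injEq _ _ _ _ ▸ (beq_iff_eq.mp hb)).2.symm⟩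
                rw [pvScanB, hget, pvDigr, if_neg h1, if_neg h2, if_neg h3, if_neg h4]
                simp only [List.map_cons, List.flatten_cons, List.flatMap_cons,
                  ih (c2 :: t) ht2]
                rfl
  exact main s.length s (le_refl _)

theorem pvJoin_empty (l : List (List Char)) : PySem.Chars.join [] l = l.flatten := by
  match l with
  | [] => rw [PySem.Chars.join_nil]; rfl
  | [p] => rw [PySem.Chars.join_singleton]; simp
  | p :: q :: rest =>
    rw [PySem.Chars.join_cons_cons]
    have := pvJoin_empty (q :: rest)
    simp [this]

theorem pvFoldl_replace_toList (pairs : List (String × String)) (s : String) :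
    (pairs.foldl (fun a p => PySem.Str.replace a p.1 p.2) s).toList
      = (pairs.map (fun p => (p.1.toList, p.2.toList))).foldl
          (fun a p => PySem.Chars.replace a p.1 p.2) s.toList := by
  induction pairs generalizing s with
  | nil => rfl
  | cons p rest ih =>
    simp only [List.map, List.foldl]
    rw [ih, PySem.Str.toList_replace]

theorem pvSorted_eval :
    PySem.List.sorted
      (PySem.Dict.items (PySem.Dict.mk [("a", "አ"), ("b", "በ"), ("c", "ከ"), ("d", "ደ"), ("e", "ኤ"), ("f", "ፈ"), ("g", "ገ"), ("h", "ሀ"), ("i", "ኢ"), ("j", "ጀ"), ("k", "ከ"), ("l", "ለ"), ("m", "መ"), ("n", "ነ"), ("o", "ኦ"), ("p", "ፐ"), ("q", "ቀ"), ("r", "ረ"), ("s", "ሰ"), ("t", "ተ"), ("u", "ኡ"), ("v", "ቨ"), ("w", "ወ"), ("x", "ክስ"), ("y", "የ"), ("z", "ዘ"), ("sh", "ሸ"), ("ch", "ቸ"), ("gn", "ኝ"), ("nh", "ኝ")]))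
      (fun x => (PySem.Str.len x.1 : Int)) true
      = [("sh", "ሸ"), ("ch", "ቸ"), ("gn", "ኝ"), ("nh", "ኝ"), ("a", "አ"), ("b", "በ"), ("c", "ከ"), ("d", "ደ"), ("e", "ኤ"), ("f", "ፈ"), ("g", "ገ"), ("h", "ሀ"), ("i", "ኢ"), ("j", "ጀ"), ("k", "ከ"), ("l", "ለ"), ("m", "መ"), ("n", "ነ"), ("o", "ኦ"), ("p", "ፐ"), ("q", "ቀ"), ("r", "ረ"), ("s", "ሰ"), ("t", "ተ"), ("u", "ኡ"), ("v", "ቨ"), ("w", "ወ"), ("x", "ክስ"), ("y", "የ"), ("z", "ዘ")] := by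
  decide

theorem pvPairs_eval :
    ([("sh", "ሸ"), ("ch", "ቸ"), ("gn", "ኝ"), ("nh", "ኝ"), ("a", "አ"), ("b", "በ"), ("c", "ከ"), ("d", "ደ"), ("e", "ኤ"), ("f", "ፈ"), ("g", "ገ"), ("h", "ሀ"), ("i", "ኢ"), ("j", "ጀ"), ("k", "ከ"), ("l", "ለ"), ("m", "መ"), ("n", "ነ"), ("o", "ኦ"), ("p", "ፐ"), ("q", "ቀ"), ("r", "ረ"), ("s", "ሰ"), ("t", "ተ"), ("u", "ኡ"), ("v", "ቨ"), ("w", "ወ"), ("x", "ክስ"), ("y", "የ"), ("z", "ዘ")] : List (String × String)).map (fun p => (p.1.toList, p.2.toList))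
      = [(['s', 'h'], ['ሸ']), (['c', 'h'], ['ቸ']), (['g', 'n'], ['ኝ']), (['n', 'h'], ['ኝ']), (['a'], ['አ']), (['b'], ['በ']), (['c'], ['ከ']), (['d'], ['ደ']), (['e'], ['ኤ']), (['f'], ['ፈ']), (['g'], ['ገ']), (['h'], ['ሀ']), (['i'], ['ኢ']), (['j'], ['ጀ']), (['k'], ['ከ']), (['l'], ['ለ']), (['m'], ['መ']), (['n'], ['ነ']), (['o'], ['ኦ']), (['p'], ['ፐ']), (['q'], ['ቀ']), (['r'], ['ረ']), (['s'], ['ሰ']), (['t'], ['ተ']), (['u'], ['ኡ']), (['v'], ['ቨ']), (['w'], ['ወ']), (['x'], ['ክ', 'ስ']), (['y'], ['የ']), (['z'], ['ዘ'])] := by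
  decide

theorem pvChainAll_eq (L : List Char) :
    ([(['s', 'h'], ['ሸ']), (['c', 'h'], ['ቸ']), (['g', 'n'], ['ኝ']), (['n', 'h'], ['ኝ']), (['a'], ['አ']), (['b'], ['በ']), (['c'], ['ከ']), (['d'], ['ደ']), (['e'], ['ኤ']), (['f'], ['ፈ']), (['g'], ['ገ']), (['h'], ['ሀ']), (['i'], ['ኢ']), (['j'], ['ጀ']), (['k'], ['ከ']), (['l'], ['ለ']), (['m'], ['መ']), (['n'], ['ነ']), (['o'], ['ኦ']), (['p'], ['ፐ']), (['q'], ['ቀ']), (['r'], ['ረ']), (['s'], ['ሰ']), (['t'], ['ተ']), (['u'], ['ኡ']), (['v'], ['ቨ']), (['w'], ['ወ']), (['x'], ['ክ', 'ስ']), (['y'], ['የ']), (['z'], ['ዘ'])] : List (List Char × List Char)).foldl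
        (fun a p => PySem.Chars.replace a p.1 p.2) L
      = pvChain1 (pvChain2 L) := by
  simp only [List.foldl, pvReplace_eq_rep, pvChain1, pvChain2, pvRules1]

-- ===== VERDICT (by name: the statement is the Claim_ definition above) =====
theorem transliterate_to_amharic_spec : Claim_equal_transliterate_to_amharic := by
  intro en_name _
  unfold Spec_transliterate_to_amharic transliterate_to_amharic transliterate_to_amharic_alt
  by_cases hg : en_name = "" ∨ en_name = "—"
  · rw [if_pos hg, if_pos hg]
  · rw [if_neg hg, if_neg hg]
    apply String.toList_inj.mp
    rw [pvFoldl_replace_toList, pvSorted_eval, pvPairs_eval, pvChainAll_eq]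
    rw [pvChain2_eq_digr, pvChain1_flatMap]
    rw [PySem.Str.toList_join, show ("" : String).toList = ([] : List Char) from rfl,
      pvJoin_empty, pvScanB_flat]
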